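-- pv_equiv track=rewrite | github.com/kmiikki/rpi-camera | python/pipgen.py | get_imgdigits
-- ===== SOURCE A (Python) =====
-- def get_imgdigits(name,extension):
--     errors=[]
--     digits=0
--     if len(name)<=len(extension):
--         errors.append("No file stem")
--     else:
--         name=name[:-len(extension)]
--         l=len(name)
--         i=l-1
--         while(i>=0):
--             if not name[i].isdigit():
--                 if digits==0:
--                     errors.append("No digits in stem")
--                 break
--             digits+=1
--             i-=1
--     return digits,errors
-- ===== SOURCE B (Python) =====
-- def get_imgdigits(name, extension):
--     errors = []
--     if len(name) <= len(extension):
--         errors.append("No file stem")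
--         return 0, errors
--     stem = name[:-len(extension)]
--     digits = len(stem) - len(stem.rstrip('0123456789'))
--     if stem and digits == 0:
--         errors.append("No digits in stem")
--     return digits, errors
-- ===== Notes on version B (the rewrite author's own statement) =====
-- stated objective: idiomatic
-- what changed: Replaces the hand-rolled backwards index-and-break while loop with an early return for the no-stem case, a single str.rstrip('0123456789') length difference to count trailing digits, and one conditional error append.
import Mathlib
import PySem

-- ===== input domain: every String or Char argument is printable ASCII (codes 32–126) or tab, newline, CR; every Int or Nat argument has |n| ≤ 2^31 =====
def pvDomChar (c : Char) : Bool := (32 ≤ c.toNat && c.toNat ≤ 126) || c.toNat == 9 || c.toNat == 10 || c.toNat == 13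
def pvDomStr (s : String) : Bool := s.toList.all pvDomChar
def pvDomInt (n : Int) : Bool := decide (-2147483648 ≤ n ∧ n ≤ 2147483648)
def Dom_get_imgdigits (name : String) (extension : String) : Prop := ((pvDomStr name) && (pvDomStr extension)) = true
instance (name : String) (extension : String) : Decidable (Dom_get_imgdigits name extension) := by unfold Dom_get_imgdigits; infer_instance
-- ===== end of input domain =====

-- B replaces A's backwards index/break while loop with an rstrip-based length difference (idiomatic, same cost).

-- ===== PORT A =====
-- A's while loop: i counts down from l-1; ported as recursion on the Nat k = i+1.
-- cs.getD k ' ' transcribes name[i]: the loop only reaches indices 0 ≤ k < cs.length, so it is always in range.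
def pvAWhile (cs : List Char) (digits : Int) : Nat → Int × List String
  | 0 => (digits, [])
  | k+1 =>
    if ¬ PySem.Chars.isdigit (cs.getD k ' ') then
      (digits, if digits = 0 then ["No digits in stem"] else [])
    else pvAWhile cs (digits + 1) k

def get_imgdigits (name : String) (extension : String) : Int × List String :=
  if name.length ≤ extension.length then
    (0, ["No file stem"])
  else
    -- name = name[:-len(extension)]  (Python slice; for extension = "" this yields "")
    let stem := PySem.Str.slice name none (some (-(extension.length : Int)))
    pvAWhile stem.toList 0 stem.toList.length

-- ===== PORT B =====
def pvDigitChars : List Char := ['0', '1', '2', '3', '4', '5', '6', '7', '8', '9']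

-- stem.rstrip('0123456789') ported by hand (PySem has no right-only strip with a char set):
-- drop the trailing run of characters from the set; exact for ASCII rstrip with an explicit char argument.
def pvRstripDigits (cs : List Char) : List Char :=
  (cs.reverse.dropWhile (fun c => decide (c ∈ pvDigitChars))).reverse

def get_imgdigits_alt (name : String) (extension : String) : Int × List String :=
  if name.length ≤ extension.length then
    (0, ["No file stem"])
  else
    let stem := PySem.Str.slice name none (some (-(extension.length : Int)))
    let digits : Int := (stem.toList.length : Int) - ((pvRstripDigits stem.toList).length : Int)
    (digits, if stem.toList ≠ [] ∧ digits = 0 then ["No digits in stem"] else [])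

-- ===== PRECONDITION & SPEC =====
def Spec_get_imgdigits (name : String) (extension : String) (out : Int × List String) : Prop := out = get_imgdigits_alt name extension
instance (name : String) (extension : String) (out : Int × List String) : Decidable (Spec_get_imgdigits name extension out) := by unfold Spec_get_imgdigits; infer_instance

-- ===== CLAIM (what is proved, stated in full; the proofs are below) =====
def Claim_equal_get_imgdigits : Prop := ∀ (name : String) (extension : String), Dom_get_imgdigits name extension → Spec_get_imgdigits name extension (get_imgdigits name extension)

-- ===== LEMMAS AND PROOFS =====

theorem pv_isdigit_eq (c : Char) :
    PySem.Chars.isdigit c = decide (c ∈ pvDigitChars) := by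
  rcases c with ⟨v, hv⟩
  simp [PySem.Chars.isdigit, pvDigitChars, Char.le_def, Char.ext_iff,
    UInt32.le_iff_toNat_le, UInt32.toNat_inj.symm]
  rw [Bool.eq_iff_iff]
  simp only [Bool.and_eq_true, Bool.or_eq_true, decide_eq_true_eq]
  omega

-- the while loop never looks past index k, so a last element beyond k is invisible
theorem pvAWhile_append (ys : List Char) (c : Char) :
    ∀ (k : Nat), k ≤ ys.length → ∀ (d : Int), pvAWhile (ys ++ [c]) d k = pvAWhile ys d k := by
  intro k
  induction k with
  | zero => intro _ d; rfl
  | succ k ih =>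
    intro hk d
    have hget : (ys ++ [c]).getD k ' ' = ys.getD k ' ' := by
      simp [List.getD_eq_getElem?_getD, List.getElem?_append_left (by omega : k < ys.length)]
    simp only [pvAWhile, hget]
    split
    · rfl
    · exact ih (by omega) _

-- characterisation of A's loop, stated over the reversed stem
theorem pvAWhile_eq (rs : List Char) :
    ∀ (d : Int), pvAWhile rs.reverse d rs.reverse.length =
      (d + ((rs.takeWhile PySem.Chars.isdigit).length : Int),
       if (rs.takeWhile PySem.Chars.isdigit).length = rs.length then []
       else if d + ((rs.takeWhile PySem.Chars.isdigit).length : Int) = 0 then ["No digits in stem"] else []) := by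
  induction rs with
  | nil => intro d; simp [pvAWhile]
  | cons c rs' ih =>
    intro d
    have hrev : (c :: rs').reverse = rs'.reverse ++ [c] := by simp
    have hlen : (c :: rs').reverse.length = rs'.reverse.length + 1 := by simp
    rw [hrev]
    have hget : (rs'.reverse ++ [c]).getD rs'.reverse.length ' ' = c := by
      simp [List.getD_eq_getElem?_getD]
    have : (rs'.reverse ++ [c]).length = rs'.reverse.length + 1 := by simp
    rw [this]
    simp only [pvAWhile, hget]
    by_cases hc : PySem.Chars.isdigit c
    · simp only [hc, not_true_eq_false]
      rw [if_neg not_false]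
      rw [pvAWhile_append rs'.reverse c rs'.reverse.length (le_refl _),
        ih (d + 1)]
      simp only [List.takeWhile_cons, hc, if_pos trivial, List.length_cons]
      rw [Prod.mk.injEq]
      constructor
      · push_cast; ring
      · by_cases h1 : (rs'.takeWhile PySem.Chars.isdigit).length = rs'.length
        · simp [h1]
        · have h2 : ¬ ((rs'.takeWhile PySem.Chars.isdigit).length + 1 = rs'.length + 1) := by omega
          simp only [if_neg h1, if_neg h2]
          have hcast : d + 1 + ((rs'.takeWhile PySem.Chars.isdigit).length : Int)
              = d + ((((rs'.takeWhile PySem.Chars.isdigit).length + 1 : Nat)) : Int) := by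
            push_cast; ring
          rw [hcast]

    · simp only [hc]
      simp only [List.takeWhile_cons, hc]
      simp

theorem pvAWhile_eq' (cs : List Char) (d : Int) :
    pvAWhile cs d cs.length =
      (d + ((cs.reverse.takeWhile PySem.Chars.isdigit).length : Int),
       if (cs.reverse.takeWhile PySem.Chars.isdigit).length = cs.length then []
       else if d + ((cs.reverse.takeWhile PySem.Chars.isdigit).length : Int) = 0 then ["No digits in stem"] else []) := by
  have h := pvAWhile_eq cs.reverse d
  rw [List.reverse_reverse, List.length_reverse] at h
  exact h

theorem pv_digits_eq (cs : List Char) :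
    (cs.length : Int) - ((pvRstripDigits cs).length : Int)
      = ((cs.reverse.takeWhile PySem.Chars.isdigit).length : Int) := by
  have hfun : (fun c => decide (c ∈ pvDigitChars)) = PySem.Chars.isdigit := by
    funext c; rw [pv_isdigit_eq]
  have hsplit := List.takeWhile_append_dropWhile (p := PySem.Chars.isdigit) (l := cs.reverse)
  have hlen : (cs.reverse.takeWhile PySem.Chars.isdigit).length
      + (cs.reverse.dropWhile PySem.Chars.isdigit).length = cs.length := by
    have h := congrArg List.length hsplit
    rw [List.length_append, List.length_reverse] at h
    exact h
  unfold pvRstripDigits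
  rw [hfun]
  simp only [List.length_reverse]
  omega

-- ===== VERDICT (by name: the statement is the Claim_ definition above) =====
theorem get_imgdigits_spec : Claim_equal_get_imgdigits := by
  intro name extension _
  unfold Spec_get_imgdigits get_imgdigits get_imgdigits_alt
  by_cases hg : name.length ≤ extension.length
  · simp [hg]
  · simp only [if_neg hg]
    set cs := (PySem.Str.slice name none (some (-(extension.length : Int)))).toList with hcs
    rw [pvAWhile_eq' cs 0, pv_digits_eq cs]
    set t := (cs.reverse.takeWhile PySem.Chars.isdigit).length with ht
    have htle : t ≤ cs.length := by
      have h := (List.takeWhile_sublist (p := PySem.Chars.isdigit) (l := cs.reverse)).length_le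
      rw [List.length_reverse] at h
      exact h
    rw [Prod.mk.injEq]
    constructor
    · ring
    · by_cases h1 : t = cs.length
      · simp only [if_pos h1]
        have hne : ¬ (cs ≠ [] ∧ (t : Int) = 0) := by
          rintro ⟨hne, hz⟩
          have ht0 : t = 0 := by omega
          have : cs.length = 0 := by omega
          exact hne (List.eq_nil_of_length_eq_zero this)
        exact (if_neg hne).symm
      · simp only [if_neg h1]
        by_cases h0 : (0 : Int) + (t : Int) = 0
        · have ht0 : t = 0 := by omega
          have hnnil : cs ≠ [] := by
            intro h
            apply h1
            simp [h, ht0]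
          rw [if_pos h0, if_pos (show ¬cs = [] ∧ ((t : Nat) : Int) = 0 from ⟨hnnil, by omega⟩)]
        · have hno : ¬ (cs ≠ [] ∧ (t : Int) = 0) := by
            rintro ⟨_, hz⟩; exact h0 (by omega)
          rw [if_neg h0, if_neg hno]
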